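-- pv_equiv track=rewrite | github.com/suraj021617/smartsuraj | utils/app_grid.py | generate_reverse_grid
-- ===== SOURCE A (Python) =====
-- def _to_str4(number_str):
--     """Ensure input is string of length 4 (pad if needed)."""
--     s = str(number_str)
--     if len(s) < 4:
--         s = s.zfill(4)
--     return s
--
-- def generate_reverse_grid(number_str):
--     """
--     Reverse grid (-1 progression)
--     Row1 = original number (unchanged)  <-- crucial: do NOT modify this row
--     Row2 = formula_map applied fully
--     Row3 = Row2 - 1 (wraparound %10)
--     Row4 = Row3 - 1 (saturate at 0, no wraparound)
--     """
--     number_str = _to_str4(number_str)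
--
--     formula_map = {
--         '0': 5, '1': 6, '2': 7, '3': 8, '4': 9,
--         '5': 0, '6': 1, '7': 2, '8': 3, '9': 4
--     }
--
--     # Row1: ALWAYS a fresh list of original digits
--     row1 = [int(d) for d in number_str]
--
--     # Row2: formula map (fresh list)
--     row2 = [formula_map[d] for d in number_str]
--
--     # Row3: row2 -1 with wraparound (fresh list)
--     row3 = [ (x - 1) % 10 for x in row2 ]
--
--     # Row4: row3 -1 but saturate at 0 (fresh list)
--     row4 = [ (x - 1) if x > 0 else 0 for x in row3 ]
--
--     return [row1, row2, row3, row4]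
-- ===== SOURCE B (Python) =====
-- def generate_reverse_grid(number_str):
--     """Column-wise rebuild: one pass computes each digit's whole column
--     [d, (d+5)%10, ((d+5)%10-1)%10, saturated-decrement], then transpose."""
--     s = str(number_str).zfill(4)
--     columns = []
--     for ch in s:
--         d = int(ch)
--         r2 = (d + 5) % 10
--         r3 = (r2 - 1) % 10
--         r4 = r3 - 1 if r3 > 0 else 0
--         columns.append((d, r2, r3, r4))
--     return [list(r) for r in zip(*columns)]
-- ===== Notes on version B (the rewrite author's own statement) =====
-- stated objective: alternative
-- what changed: B builds the grid column-by-column in a single pass (each digit's 4-entry column from the closed form (d+5)%10 instead of the formula_map dict) and transposes, instead of A's four separate row-wise list comprehensions cascading row after row.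
import Mathlib
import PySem

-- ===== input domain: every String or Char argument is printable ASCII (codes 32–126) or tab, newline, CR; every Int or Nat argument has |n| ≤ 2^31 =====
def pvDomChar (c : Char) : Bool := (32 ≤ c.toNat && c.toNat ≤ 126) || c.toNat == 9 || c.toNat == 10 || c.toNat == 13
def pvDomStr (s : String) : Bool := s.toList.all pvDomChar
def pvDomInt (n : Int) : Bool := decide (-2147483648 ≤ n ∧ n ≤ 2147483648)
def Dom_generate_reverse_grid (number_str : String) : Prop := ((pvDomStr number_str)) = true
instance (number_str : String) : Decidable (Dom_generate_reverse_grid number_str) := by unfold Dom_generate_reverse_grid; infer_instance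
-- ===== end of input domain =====

-- B changes the decomposition: one pass building whole columns from the closed form (d+5)%10, then a transpose — not faster, an alternative structure.

-- ===== PORT A =====
-- _to_str4: str() on a str is identity; zfill only applied when len < 4, as in the source
def toStr4 (s : List Char) : List Char :=
  if s.length < 4 then PySem.Chars.zfill s 4 else s

-- int(d) for a single char; Pre_ restricts to digit chars, where this equals Python's int()
def pyIntOfDigit (c : Char) : Int := (c.toNat : Int) - 48

-- the formula_map dict as a literal lookup (KeyError outside digits, excluded by Pre_)
def formulaMap (c : Char) : Int :=
  if c = '0' then 5 else if c = '1' then 6 else if c = '2' then 7 else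
  if c = '3' then 8 else if c = '4' then 9 else if c = '5' then 0 else
  if c = '6' then 1 else if c = '7' then 2 else if c = '8' then 3 else 4

def generate_reverse_grid (number_str : String) : List (List Int) :=
  let s := toStr4 number_str.toList
  let row1 := s.map pyIntOfDigit
  let row2 := s.map formulaMap
  let row3 := row2.map (fun x => PySem.Int.mod (x - 1) 10)
  let row4 := row3.map (fun x => if x > 0 then x - 1 else 0)
  [row1, row2, row3, row4]

-- ===== PORT B =====
-- one digit's whole column (d, r2, r3, r4)
def colOf (c : Char) : Int × Int × Int × Int :=
  let d : Int := (c.toNat : Int) - 48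
  let r2 := PySem.Int.mod (d + 5) 10
  let r3 := PySem.Int.mod (r2 - 1) 10
  let r4 := if r3 > 0 then r3 - 1 else 0
  (d, r2, r3, r4)

def generate_reverse_grid_alt (number_str : String) : List (List Int) :=
  let s := PySem.Chars.zfill number_str.toList 4
  let cols := s.map colOf
  -- zip(*cols): cols is never empty (zfill pads to length ≥ 4), so zip yields exactly the 4 projections
  [cols.map (·.1), cols.map (·.2.1), cols.map (·.2.2.1), cols.map (·.2.2.2)]

-- ===== PRECONDITION & SPEC =====
-- Pre_ excludes exactly the inputs containing a non-digit character, on which A raises (ValueError from int(), or KeyError from formula_map).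
def Pre_generate_reverse_grid (number_str : String) : Prop :=
  number_str.toList.all PySem.Chars.isdigit = true
instance (number_str : String) : Decidable (Pre_generate_reverse_grid number_str) := by
  unfold Pre_generate_reverse_grid; infer_instance

def pvWitness_generate_reverse_grid : String := "2047"

def Spec_generate_reverse_grid (number_str : String) (out : List (List Int)) : Prop := out = generate_reverse_grid_alt number_str
instance (number_str : String) (out : List (List Int)) : Decidable (Spec_generate_reverse_grid number_str out) := by unfold Spec_generate_reverse_grid; infer_instance

-- ===== CLAIM (what is proved, stated in full; the proofs are below) =====
def Claim_equal_generate_reverse_grid : Prop := ∀ (number_str : String), Dom_generate_reverse_grid number_str → Pre_generate_reverse_grid number_str → Spec_generate_reverse_grid number_str (generate_reverse_grid number_str)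

-- ===== LEMMAS AND PROOFS =====

theorem toStr4_eq_zfill (s : List Char) : toStr4 s = PySem.Chars.zfill s 4 := by
  unfold toStr4
  split_ifs with h
  · rfl
  · unfold PySem.Chars.zfill
    rw [if_pos (by omega : (4 : Int) ≤ (s.length : Int))]

theorem digit_cases (c : Char) (h : PySem.Chars.isdigit c = true) :
    c = '0' ∨ c = '1' ∨ c = '2' ∨ c = '3' ∨ c = '4' ∨ c = '5' ∨ c = '6' ∨ c = '7' ∨ c = '8' ∨ c = '9' := by
  simp [PySem.Chars.isdigit, Char.le_def, UInt32.le_iff_toNat_le] at h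
  obtain ⟨h1, h2⟩ := h
  have hl : 48 ≤ c.val.toNat := by simpa using h1
  have hr : c.val.toNat ≤ 57 := by simpa using h2
  have hchar : ∀ d : Char, c.val.toNat = d.val.toNat → c = d := fun d hd =>
    Char.ext (UInt32.toNat_inj.mp hd)
  interval_cases h : c.val.toNat
  · exact Or.inl (hchar '0' (by decide))
  · exact Or.inr (Or.inl (hchar '1' (by decide)))
  · exact Or.inr (Or.inr (Or.inl (hchar '2' (by decide))))
  · exact Or.inr (Or.inr (Or.inr (Or.inl (hchar '3' (by decide)))))
  · exact Or.inr (Or.inr (Or.inr (Or.inr (Or.inl (hchar '4' (by decide))))))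
  · exact Or.inr (Or.inr (Or.inr (Or.inr (Or.inr (Or.inl (hchar '5' (by decide)))))))
  · exact Or.inr (Or.inr (Or.inr (Or.inr (Or.inr (Or.inr (Or.inl (hchar '6' (by decide))))))))
  · exact Or.inr (Or.inr (Or.inr (Or.inr (Or.inr (Or.inr (Or.inr (Or.inl (hchar '7' (by decide)))))))))
  · exact Or.inr (Or.inr (Or.inr (Or.inr (Or.inr (Or.inr (Or.inr (Or.inr (Or.inl (hchar '8' (by decide))))))))))
  · exact Or.inr (Or.inr (Or.inr (Or.inr (Or.inr (Or.inr (Or.inr (Or.inr (Or.inr (hchar '9' (by decide))))))))))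

-- formula_map agrees with the closed form (d+5)%10 on digit chars
theorem formulaMap_eq_closed (c : Char) (h : PySem.Chars.isdigit c = true) :
    formulaMap c = PySem.Int.mod (pyIntOfDigit c + 5) 10 := by
  rcases digit_cases c h with h | h | h | h | h | h | h | h | h | h <;> subst h <;> decide

-- zfill of an all-digit string is all digits
theorem zfill_digits (s : List Char) (h : ∀ c ∈ s, PySem.Chars.isdigit c = true) :
    ∀ c ∈ PySem.Chars.zfill s 4, PySem.Chars.isdigit c = true := by
  intro c hc
  unfold PySem.Chars.zfill at hc
  split_ifs at hc with h4
  · exact h c hc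
  · match s, h with
    | [], _ =>
      simp at hc
      subst hc; decide
    | c0 :: rest, h =>
      have hc0 : c0 ≠ '+' ∧ c0 ≠ '-' := by
        have := h c0 (by simp)
        rcases digit_cases c0 this with h | h | h | h | h | h | h | h | h | h <;> subst h <;> decide
      simp only [hc0.1, hc0.2, or_self, if_neg, not_false_iff] at hc
      rcases List.mem_append.mp hc with hc | hc
      · have := List.eq_of_mem_replicate hc; subst this; decide
      · exact h c hc

theorem generate_reverse_grid_spec : Claim_equal_generate_reverse_grid := by
  intro number_str _ hpre
  unfold Pre_generate_reverse_grid at hpre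
  rw [List.all_eq_true] at hpre
  unfold Spec_generate_reverse_grid
  simp only [generate_reverse_grid, generate_reverse_grid_alt]
  rw [toStr4_eq_zfill]
  have hd := zfill_digits number_str.toList hpre
  set t := PySem.Chars.zfill number_str.toList 4 with ht
  have h1 : t.map pyIntOfDigit = (t.map colOf).map (·.1) := by
    rw [List.map_map]
    exact List.map_congr_left fun c hc => rfl
  have h2 : t.map formulaMap = (t.map colOf).map (·.2.1) := by
    rw [List.map_map]
    exact List.map_congr_left fun c hc => formulaMap_eq_closed c (hd c hc)
  have h3 : (t.map formulaMap).map (fun x => PySem.Int.mod (x - 1) 10)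
      = (t.map colOf).map (·.2.2.1) := by
    rw [List.map_map, List.map_map]
    exact List.map_congr_left fun c hc => by
      show PySem.Int.mod (formulaMap c - 1) 10 = (colOf c).2.2.1
      rw [formulaMap_eq_closed c (hd c hc)]
      rfl
  have h4 : ((t.map formulaMap).map (fun x => PySem.Int.mod (x - 1) 10)).map
        (fun x => if x > 0 then x - 1 else 0)
      = (t.map colOf).map (·.2.2.2) := by
    rw [h3]
    simp only [List.map_map]
    exact List.map_congr_left fun c hc => rfl
  rw [h1, h4, h3, h2]
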